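-- pv_equiv track=rewrite | github.com/dblyon/agotool | app/python/create_SQL_tables_snakemake.py | helper_select_higher_score_if_redundant
-- ===== SOURCE A (Python) =====
-- def helper_select_higher_score_if_redundant(funcEnum_2_score_per_ENSP):
--     funcEnum_2_score_dict = {}
--     for funcEnum, score in funcEnum_2_score_per_ENSP:
--         if funcEnum not in funcEnum_2_score_dict:
--             funcEnum_2_score_dict[funcEnum] = score
--         else:
--             previous_score = funcEnum_2_score_dict[funcEnum]
--             if score > previous_score:
--                 funcEnum_2_score_dict[funcEnum] = score
--             else:
--                 pass # keep current score, since higher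
--     return [[funcEnum, funcEnum_2_score_dict[funcEnum]] for funcEnum in funcEnum_2_score_dict.keys()]
-- ===== SOURCE B (Python) =====
-- def helper_select_higher_score_if_redundant(funcEnum_2_score_per_ENSP):
--     # pass 1: group all scores per funcEnum (first-seen key order preserved)
--     scores_per_funcEnum = {}
--     for funcEnum, score in funcEnum_2_score_per_ENSP:
--         scores_per_funcEnum.setdefault(funcEnum, []).append(score)
--     # pass 2: reduce each group to its maximum
--     return [[funcEnum, max(scores)] for funcEnum, scores in scores_per_funcEnum.items()]
-- ===== Notes on version B (the rewrite author's own statement) =====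
-- stated objective: alternative
-- what changed: B groups all scores per funcEnum into lists in one pass and then reduces each group with max in a second pass, instead of A's inline running-max with a membership test per pair.
import Mathlib
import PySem

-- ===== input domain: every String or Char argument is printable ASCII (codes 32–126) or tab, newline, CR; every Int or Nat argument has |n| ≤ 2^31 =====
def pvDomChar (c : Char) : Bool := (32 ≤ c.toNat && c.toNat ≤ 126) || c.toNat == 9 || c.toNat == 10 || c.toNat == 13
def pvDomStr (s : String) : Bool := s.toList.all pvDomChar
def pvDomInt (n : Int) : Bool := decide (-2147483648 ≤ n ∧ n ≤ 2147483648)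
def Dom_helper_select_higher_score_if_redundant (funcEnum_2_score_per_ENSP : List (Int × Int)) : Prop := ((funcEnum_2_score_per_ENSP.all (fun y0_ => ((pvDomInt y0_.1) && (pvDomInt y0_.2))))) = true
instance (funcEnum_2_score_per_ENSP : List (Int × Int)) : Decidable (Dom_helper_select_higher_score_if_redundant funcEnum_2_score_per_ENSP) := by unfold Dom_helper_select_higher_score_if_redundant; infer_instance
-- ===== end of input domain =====

-- B groups all scores per funcEnum in one pass, then reduces each group with max in a second pass
-- (instead of A's inline running-max); same cost, different decomposition.

-- ===== PORT A =====
def helper_select_higher_score_if_redundant (funcEnum_2_score_per_ENSP : List (Int × Int)) : List (List Int) :=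
  let funcEnum_2_score_dict : PySem.Dict Int Int :=
    funcEnum_2_score_per_ENSP.foldl (fun d p =>
      match d.get? p.1 with
      | none => d.insert p.1 p.2                 -- funcEnum not in dict
      | some previous_score =>                   -- funcEnum already present
        if p.2 > previous_score then d.insert p.1 p.2 else d) PySem.Dict.empty
  funcEnum_2_score_dict.keys.map (fun funcEnum => [funcEnum, funcEnum_2_score_dict.getD funcEnum 0])
  -- getD 0 is exact: every key of the dict is present, so the default is never used

-- ===== PORT B =====
-- max(scores) of Source B; the [] case is unreachable (grouped lists are nonempty)
def pyMaxList (xs : List Int) : Int :=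
  match xs with
  | [] => 0
  | h :: t => t.foldl (fun a x => if x > a then x else a) h

def helper_select_higher_score_if_redundant_alt (funcEnum_2_score_per_ENSP : List (Int × Int)) : List (List Int) :=
  let scores_per_funcEnum : PySem.Dict Int (List Int) :=
    funcEnum_2_score_per_ENSP.foldl (fun d p => d.modify p.1 [] (fun v => v ++ [p.2])) PySem.Dict.empty
  scores_per_funcEnum.items.map (fun kv => [kv.1, pyMaxList kv.2])

-- ===== PRECONDITION & SPEC =====
def Spec_helper_select_higher_score_if_redundant (funcEnum_2_score_per_ENSP : List (Int × Int)) (out : List (List Int)) : Prop := out = helper_select_higher_score_if_redundant_alt funcEnum_2_score_per_ENSP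
instance (funcEnum_2_score_per_ENSP : List (Int × Int)) (out : List (List Int)) : Decidable (Spec_helper_select_higher_score_if_redundant funcEnum_2_score_per_ENSP out) := by unfold Spec_helper_select_higher_score_if_redundant; infer_instance

-- ===== CLAIM (what is proved, stated in full; the proofs are below) =====
def Claim_equal_helper_select_higher_score_if_redundant : Prop := ∀ (funcEnum_2_score_per_ENSP : List (Int × Int)), Dom_helper_select_higher_score_if_redundant funcEnum_2_score_per_ENSP → Spec_helper_select_higher_score_if_redundant funcEnum_2_score_per_ENSP (helper_select_higher_score_if_redundant funcEnum_2_score_per_ENSP)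

-- ===== LEMMAS AND PROOFS =====

-- A's loop step
def stepA (d : PySem.Dict Int Int) (p : Int × Int) : PySem.Dict Int Int :=
  match d.get? p.1 with
  | none => d.insert p.1 p.2
  | some previous_score => if p.2 > previous_score then d.insert p.1 p.2 else d

-- running max on an Option accumulator
def ostep (o : Option Int) (x : Int) : Option Int :=
  some (match o with | none => x | some a => if x > a then x else a)

theorem stepA_get? (d : PySem.Dict Int Int) (p : Int × Int) (k : Int) :
    (stepA d p).get? k = if p.1 = k then ostep (d.get? k) p.2 else d.get? k := by
  unfold stepA ostep
  have hk0 : ∀ h : ¬ p.1 = k, ¬ k = p.1 := fun h hk => h hk.symm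
  cases hg : d.get? p.1 with
  | none =>
    dsimp only
    rw [PySem.Dict.get?_insert]
    by_cases h : p.1 = k
    · subst h; simp [hg]
    · simp [h, hk0 h]
  | some a =>
    dsimp only
    split_ifs with hx h h
    · subst h; rw [PySem.Dict.get?_insert]; simp [hg, hx]
    · rw [PySem.Dict.get?_insert]; simp [hk0 h]
    · subst h; simp [hg, hx]
    · rfl

theorem foldA_get? (l : List (Int × Int)) (d : PySem.Dict Int Int) (k : Int) :
    (l.foldl stepA d).get? k
      = ((l.filter (fun p => p.1 == k)).map (·.2)).foldl ostep (d.get? k) := by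
  induction l generalizing d with
  | nil => rfl
  | cons q t ih =>
    simp only [List.foldl_cons, List.filter_cons]
    rw [ih, stepA_get?]
    by_cases h : q.1 = k
    · simp [h]
    · simp [h, beq_eq_false_iff_ne.mpr h]

theorem foldA_keys (l : List (Int × Int)) (d : PySem.Dict Int Int) :
    (l.foldl stepA d).keys = PySem.Set.update d.keys (l.map (·.1)) := by
  induction l generalizing d with
  | nil => simp [PySem.Set.update]
  | cons q t ih =>
    simp only [List.foldl_cons, List.map_cons, ih (stepA d q), PySem.Set.update_cons]
    congr 1
    unfold stepA
    cases hg : d.get? q.1 with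
    | none =>
      have hc : d.contains q.1 = false := by
        rw [PySem.Dict.contains_eq_isSome_get?, hg]; rfl
      have hm : ¬ q.1 ∈ d.keys := by
        intro hm
        rw [(PySem.Dict.contains_iff_mem_keys _ _).mpr hm] at hc
        simp at hc
      dsimp only
      rw [PySem.Dict.keys_insert_of_not_contains d q.2 hc, PySem.Set.add]
      simp [hm]
    | some a =>
      have hc : d.contains q.1 = true := by
        rw [PySem.Dict.contains_eq_isSome_get?, hg]; rfl
      have hm : q.1 ∈ d.keys := (PySem.Dict.contains_iff_mem_keys _ _).mp hc
      dsimp only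
      split_ifs with hx
      · rw [PySem.Dict.keys_insert_of_contains d q.2 hc, PySem.Set.add]; simp [hm]
      · rw [PySem.Set.add]; simp [hm]

theorem foldl_ostep_some (t : List Int) (a : Int) :
    t.foldl ostep (some a) = some (t.foldl (fun a x => if x > a then x else a) a) := by
  induction t generalizing a with
  | nil => rfl
  | cons x xs ih => simp only [List.foldl_cons, ostep, ih]

theorem foldl_ostep_pyMax (xs : List Int) (h : xs ≠ []) :
    xs.foldl ostep none = some (pyMaxList xs) := by
  cases xs with
  | nil => exact absurd rfl h
  | cons y t => simp only [List.foldl_cons, ostep, pyMaxList, foldl_ostep_some]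

-- ===== VERDICT =====
theorem helper_select_higher_score_if_redundant_spec : Claim_equal_helper_select_higher_score_if_redundant := by
  unfold Claim_equal_helper_select_higher_score_if_redundant
  intro l _
  unfold Spec_helper_select_higher_score_if_redundant
  unfold helper_select_higher_score_if_redundant helper_select_higher_score_if_redundant_alt
  simp only
  set dB : PySem.Dict Int (List Int) :=
    l.foldl (fun d p => d.modify p.1 [] (fun v => v ++ [p.2])) PySem.Dict.empty with hdB
  have hndB : dB.keys.Nodup := by
    rw [hdB]
    exact PySem.Dict.nodup_keys_foldl_modify_key l (·.1) [] (fun d p v => v ++ [p.2])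
      PySem.Dict.empty (by simp)
  have hkB : dB.keys = PySem.Set.update (PySem.Dict.empty (κ := Int) (ν := List Int)).keys (l.map (·.1)) := by
    rw [hdB]
    exact PySem.Dict.keys_foldl_modify_key l (·.1) [] (fun d p v => v ++ [p.2]) PySem.Dict.empty
  have hkA : (l.foldl stepA PySem.Dict.empty).keys
      = PySem.Set.update (PySem.Dict.empty (κ := Int) (ν := Int)).keys (l.map (·.1)) :=
    foldA_keys l PySem.Dict.empty
  have hitems : dB.items = dB.keys.map (fun k => (k, dB.getD k [])) :=
    PySem.Dict.items_eq_map_keys dB hndB []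
  have hfold : (l.foldl (fun d p => stepA d p) PySem.Dict.empty)
      = l.foldl stepA PySem.Dict.empty := rfl
  rw [hitems, List.map_map]
  rw [show (fun d p => match d.get? (p : Int × Int).1 with
        | none => d.insert p.1 p.2
        | some previous_score => if p.2 > previous_score then d.insert p.1 p.2 else d) = stepA from rfl]
  have hkB' : dB.keys = PySem.Set.ofList (l.map (·.1)) := by
    rw [hkB, PySem.Dict.keys_empty, PySem.Set.update_nil_left]
  have hkA' : (l.foldl stepA PySem.Dict.empty).keys = PySem.Set.ofList (l.map (·.1)) := by
    rw [hkA, PySem.Dict.keys_empty, PySem.Set.update_nil_left]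
  rw [hkA', ← hkB']
  apply List.map_congr_left
  intro k hk
  simp only [Function.comp]
  congr 1
  -- value at a key k that occurs in l
  have hkmem : k ∈ l.map (·.1) := by
    rw [hkB'] at hk
    exact (PySem.Set.mem_ofList (l.map (·.1)) k).mp hk
  have hne : (l.filter (fun p => p.1 == k)).map (·.2) ≠ [] := by
    simp only [ne_eq, List.map_eq_nil_iff, List.filter_eq_nil_iff]
    intro hall
    obtain ⟨p, hp, hpk⟩ := List.mem_map.mp hkmem
    exact hall p hp (by simp [hpk])
  have hA : (l.foldl stepA PySem.Dict.empty).getD k 0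
      = pyMaxList ((l.filter (fun p => p.1 == k)).map (·.2)) := by
    rw [PySem.Dict.getD_eq_get?_getD, foldA_get?, PySem.Dict.get?_empty,
      foldl_ostep_pyMax _ hne]
    rfl
  have hB : dB.getD k [] = (l.filter (fun p => p.1 == k)).map (·.2) := by
    rw [hdB]
    have := PySem.Dict.getD_foldl_modify_append (l := l) (d := PySem.Dict.empty (κ := Int) (ν := List Int)) (c := k)
    simpa [PySem.Dict.getD_empty] using this
  rw [hA, hB]
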